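-- pv_equiv track=rewrite | github.com/xiyan524/MORSE | scorer/eval/scorer_morse.py | make_context_dict
-- ===== SOURCE A (Python) =====
-- def find_all_substr(s, sub):
-- 	index_list = []
-- 	index = s.find(sub)
-- 	while index != -1:
-- 		if s[index+4].isdigit():
-- 			index_list.append(index)
-- 		index = s.find(sub, index + 1)
--
-- 	return index_list
--
-- def make_context_dict(context):
--     sent_index = find_all_substr(context, "sent")
--     candidate_sents_dict = {}
--     for index_s in range(len(sent_index)):
--         if index_s != len(sent_index) - 1:
--             candidate_sents_dict["sent"+str(index_s+1)] = context[sent_index[index_s]:sent_index[index_s + 1] - 1]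
--         else:
--             candidate_sents_dict["sent"+str(index_s+1)] = context[sent_index[index_s]:]
--     return candidate_sents_dict
-- ===== SOURCE B (Python) =====
-- def make_context_dict(context):
--     candidate_sents_dict = {}
--     prev = 0
--     count = 0
--     index = context.find("sent")
--     while index != -1:
--         if context[index + 4].isdigit():
--             if count > 0:
--                 candidate_sents_dict["sent" + str(count)] = context[prev:index - 1]
--             prev = index
--             count += 1
--         index = context.find("sent", index + 1)
--     if count > 0:
--         candidate_sents_dict["sent" + str(count)] = context[prev:]
--     return candidate_sents_dict
-- ===== Notes on version B (the rewrite author's own statement) =====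
-- stated objective: alternative
-- what changed: Replaces A's two-phase design (collect all qualifying 'sent' marker indices into a list, then slice the string by adjacent index pairs in a second indexed loop) with a single streaming pass that keeps only the previous marker position and a counter and emits each sentence as soon as the next marker is found, so no intermediate index list is built.
-- outside the precondition, e.g. on make_context_dict('sent'): A raises IndexError, B raises IndexError
import Mathlib
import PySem

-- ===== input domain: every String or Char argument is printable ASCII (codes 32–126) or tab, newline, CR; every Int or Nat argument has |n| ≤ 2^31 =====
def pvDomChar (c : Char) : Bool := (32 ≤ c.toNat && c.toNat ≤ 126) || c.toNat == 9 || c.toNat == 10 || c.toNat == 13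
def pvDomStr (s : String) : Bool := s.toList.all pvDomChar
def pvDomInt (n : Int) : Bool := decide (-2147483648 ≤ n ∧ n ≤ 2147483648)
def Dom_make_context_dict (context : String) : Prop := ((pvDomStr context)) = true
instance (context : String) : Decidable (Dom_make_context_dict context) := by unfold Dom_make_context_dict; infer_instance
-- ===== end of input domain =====

-- B replaces A's two-phase design (collect all qualifying marker indices, then slice by index pairs)
-- with a single streaming pass that keeps only the previous marker position and a counter (objective:
-- alternative decomposition; same observable behaviour, including which inputs raise).

-- ===== PORT A =====
-- "sent" + str(n): Python string concatenation, built on the character lists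
def pvKey (n : Int) : String := String.ofList ("sent".toList ++ PySem.Int.toChars n)

-- s[index+4].isdigit(); the `none` case is Python's IndexError, excluded by Pre_
def pvIsDigitAt (s : List Char) (i : Int) : Bool :=
  match PySem.List.pyGet? s i with
  | some c => PySem.Chars.isdigit c
  | none => false

-- the while-loop of find_all_substr; fuel s.length + 1 dominates the number of iterations
def findAllSubstr (s sub : List Char) (start : Nat) (index_list : List Int) : Nat → List Int
  | 0 => index_list
  | fuel + 1 =>
    let index := PySem.Chars.findFrom s sub (start : Int)
    if index = -1 then index_list
    else
      let index_list' := if pvIsDigitAt s (index + 4) then index_list ++ [index] else index_list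
      findAllSubstr s sub (index.toNat + 1) index_list' fuel

def make_context_dict (context : String) : List (String × String) :=
  let s := context.toList
  let sent_index := findAllSubstr s ("sent".toList) 0 [] (s.length + 1)
  let d := (PySem.List.pyRange 0 (sent_index.length : Int)).foldl
    (fun (d : PySem.Dict String String) index_s =>
      if index_s ≠ (sent_index.length : Int) - 1 then
        d.insert (pvKey (index_s + 1))
          (String.ofList (PySem.List.slice s (some (PySem.List.pyGetD sent_index index_s 0))
            (some (PySem.List.pyGetD sent_index (index_s + 1) 0 - 1))))
      else
        d.insert (pvKey (index_s + 1))
          (String.ofList (PySem.List.slice s (some (PySem.List.pyGetD sent_index index_s 0)) none)))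
    PySem.Dict.empty
  d.items

-- ===== PORT B =====
-- one streaming pass: prev = position of the previous qualifying marker, count = how many seen
def streamGo (s : List Char) (start : Nat) (prev : Int) (count : Nat)
    (d : PySem.Dict String String) : Nat → PySem.Dict String String
  | 0 =>
    if 0 < count then d.insert (pvKey count) (String.ofList (PySem.List.slice s (some prev) none)) else d
  | fuel + 1 =>
    let index := PySem.Chars.findFrom s ("sent".toList) (start : Int)
    if index = -1 then
      if 0 < count then d.insert (pvKey count) (String.ofList (PySem.List.slice s (some prev) none)) else d
    else if pvIsDigitAt s (index + 4) then
      let d' :=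
        if 0 < count then
          d.insert (pvKey count) (String.ofList (PySem.List.slice s (some prev) (some (index - 1))))
        else d
      streamGo s (index.toNat + 1) index (count + 1) d' fuel
    else
      streamGo s (index.toNat + 1) prev count d fuel

def make_context_dict_alt (context : String) : List (String × String) :=
  let s := context.toList
  (streamGo s 0 0 0 PySem.Dict.empty (s.length + 1)).items

-- ===== PRECONDITION & SPEC =====
-- Pre_ excludes exactly the inputs on which A (and B) raise IndexError: a "sent" marker flush with
-- the end of the string makes `context[index+4]` go out of range, i.e. context ends with "sent".
def Pre_make_context_dict (context : String) : Prop :=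
  PySem.Str.endswith context "sent" = false
instance (context : String) : Decidable (Pre_make_context_dict context) := by
  unfold Pre_make_context_dict; infer_instance
def pvWitness_make_context_dict : String := "sent1 one sentence. sent2 another."

def Spec_make_context_dict (context : String) (out : List (String × String)) : Prop :=
  out = make_context_dict_alt context
instance (context : String) (out : List (String × String)) : Decidable (Spec_make_context_dict context out) := by
  unfold Spec_make_context_dict; infer_instance

-- ===== CLAIM (what is proved, stated in full; the proofs are below) =====
def Claim_equal_make_context_dict : Prop := ∀ (context : String), Dom_make_context_dict context → Pre_make_context_dict context → Spec_make_context_dict context (make_context_dict context)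

-- ===== LEMMAS AND PROOFS =====

-- the sentence pairs contributed from a current key number n and previous marker position p
def pairsCont (s : List Char) (n : Nat) (p : Int) : List Int → List (String × String)
  | [] => [(pvKey n, String.ofList (PySem.List.slice s (some p) none))]
  | j :: rest =>
    (pvKey n, String.ofList (PySem.List.slice s (some p) (some (j - 1)))) :: pairsCont s (n + 1) j rest

-- what B's streaming state (count, prev) still owes, given the remaining qualifying indices qs
def tailSpec (s : List Char) (count : Nat) (prev : Int) (qs : List Int) : List (String × String) :=
  match count with
  | 0 =>
    match qs with
    | [] => []
    | j :: rest => pairsCont s 1 j rest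
  | k + 1 => pairsCont s (k + 1) prev qs

-- `str(n)` is injective: decoding the decimal digits recovers n
lemma digitChar_toNat (m : Nat) (h : m < 10) : (Nat.digitChar m).toNat - 48 = m := by
  interval_cases m <;> rfl

lemma toDigitsCore_acc (f n : Nat) (ds : List Char) :
    Nat.toDigitsCore 10 f n ds = Nat.toDigitsCore 10 f n [] ++ ds := by
  induction f generalizing n ds with
  | zero => simp [Nat.toDigitsCore]
  | succ f ih =>
    simp only [Nat.toDigitsCore]
    by_cases h : n / 10 = 0
    · simp [h]
    · simp only [h, ite_false]
      rw [ih (n / 10) ((n % 10).digitChar :: ds), ih (n / 10) [(n % 10).digitChar]]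
      simp

lemma toDigitsCore_fuel (n : Nat) : ∀ (f f' : Nat), n < f → n < f' →
    Nat.toDigitsCore 10 f n [] = Nat.toDigitsCore 10 f' n [] := by
  induction n using Nat.strong_induction_on with
  | _ n ih =>
    intro f f' hf hf'
    match f, f' with
    | f + 1, f' + 1 =>
      simp only [Nat.toDigitsCore]
      by_cases h : n / 10 = 0
      · simp [h]
      · have hn : 0 < n := by
          rcases Nat.eq_zero_or_pos n with h0 | h0
          · exact absurd (by simp [h0]) h
          · exact h0
        simp only [h, ite_false]
        rw [toDigitsCore_acc f, toDigitsCore_acc f']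
        rw [ih (n / 10) (by omega) f f' (by omega) (by omega)]

def pvDec (l : List Char) : Nat := l.foldl (fun a c => a * 10 + (c.toNat - 48)) 0

lemma pvDec_toDigits (n : Nat) : pvDec (Nat.toDigits 10 n) = n := by
  induction n using Nat.strong_induction_on with
  | _ n ih =>
    show pvDec (Nat.toDigitsCore 10 (n + 1) n []) = n
    simp only [Nat.toDigitsCore]
    by_cases h : n / 10 = 0
    · have hn : n < 10 := by omega
      simp only [h, ite_true]
      simp [pvDec, digitChar_toNat (n % 10) (Nat.mod_lt _ (by omega))]
      omega
    · have hn : 0 < n := by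
        rcases Nat.eq_zero_or_pos n with h0 | h0
        · exact absurd (by simp [h0]) h
        · exact h0
      simp only [h, ite_false]
      rw [toDigitsCore_acc n]
      rw [toDigitsCore_fuel (n / 10) n (n / 10 + 1) (by omega) (by omega)]
      have hrec := ih (n / 10) (by omega)
      unfold Nat.toDigits at hrec
      simp only [pvDec, List.foldl_append] at *
      rw [hrec]
      simp [digitChar_toNat (n % 10) (Nat.mod_lt _ (by omega))]
      omega

lemma pvKey_inj {m n : Nat} (h : pvKey (m : Int) = pvKey (n : Int)) : m = n := by
  have h2 := congrArg String.toList h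
  simp only [pvKey, String.toList_ofList, List.append_cancel_left_eq] at h2
  simp only [PySem.Int.toChars, Int.toNat_natCast] at h2
  rw [if_neg (by omega), if_neg (by omega)] at h2
  have := congrArg pvDec h2
  rwa [pvDec_toDigits, pvDec_toDigits] at this

lemma pvKey_beq_false {m n : Nat} (h : m ≠ n) : (pvKey (m : Int) == pvKey (n : Int)) = false := by
  rw [beq_eq_false_iff_ne]
  intro hk
  exact h (pvKey_inj hk)

-- the accumulator of find_all_substr's loop only ever grows at the back
lemma findAll_acc (s sub : List Char) : ∀ (fuel start : Nat) (acc : List Int),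
    findAllSubstr s sub start acc fuel = acc ++ findAllSubstr s sub start [] fuel := by
  intro fuel
  induction fuel with
  | zero => intro start acc; simp [findAllSubstr]
  | succ f ih =>
    intro start acc
    simp only [findAllSubstr]
    by_cases h : PySem.Chars.findFrom s sub (start : Int) = -1
    · simp [h]
    · simp only [h, ite_false]
      by_cases hd : pvIsDigitAt s (PySem.Chars.findFrom s sub (start : Int) + 4) = true
      · simp only [hd, ite_true, List.nil_append]
        rw [ih _ (acc ++ [PySem.Chars.findFrom s sub (start : Int)]),
            ih _ [PySem.Chars.findFrom s sub (start : Int)]]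
        simp
      · simp only [Bool.not_eq_true] at hd
        simp only [hd, Bool.false_eq_true, ite_false]
        exact ih _ acc

-- a hit of "sent" at a position admitted by findFrom stays 4 characters inside the string
lemma findFrom_facts {s : List Char} {start : Nat} (hs : start ≤ s.length)
    (h : PySem.Chars.findFrom s ("sent".toList) (start : Int) ≠ -1) :
    0 ≤ PySem.Chars.findFrom s ("sent".toList) (start : Int) ∧
      (PySem.Chars.findFrom s ("sent".toList) (start : Int)).toNat + 4 ≤ s.length := by
  obtain ⟨h1, h2, -⟩ := PySem.Chars.findFrom_natCast_spec s ("sent".toList) start hs h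
  refine ⟨le_trans (by positivity) h1, ?_⟩
  have hl := h2.length_le
  simp only [List.length_drop] at hl
  have h4 : ("sent".toList).length = 4 := by decide
  omega

-- B's streaming loop, started on any state, produces exactly the pairs that A's slicing phase
-- later derives from the indices the same scan would collect
lemma stream_eq (s : List Char) : ∀ (fuel start : Nat) (count : Nat) (prev : Int)
    (d : PySem.Dict String String), start ≤ s.length →
    (∀ m : Nat, count ≤ m → 1 ≤ m → d.contains (pvKey (m : Int)) = false) →
    (streamGo s start prev count d fuel).items
      = d.items ++ tailSpec s count prev (findAllSubstr s ("sent".toList) start [] fuel) := by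
  intro fuel
  induction fuel with
  | zero =>
    intro start count prev d hs hk
    match count with
    | 0 => simp [streamGo, findAllSubstr, tailSpec]
    | k + 1 =>
      simp only [streamGo, findAllSubstr, tailSpec, pairsCont, Nat.zero_lt_succ, ite_true]
      rw [PySem.Dict.items_insert_of_not_contains _ _ (hk (k + 1) le_rfl (by omega))]
  | succ f ih =>
    intro start count prev d hs hk
    simp only [streamGo, findAllSubstr]
    by_cases h : PySem.Chars.findFrom s ("sent".toList) (start : Int) = -1
    · simp only [h, ite_true]
      match count with
      | 0 => simp [tailSpec]
      | k + 1 =>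
        simp only [tailSpec, pairsCont, Nat.zero_lt_succ, ite_true]
        rw [PySem.Dict.items_insert_of_not_contains _ _ (hk (k + 1) le_rfl (by omega))]
    · obtain ⟨hge, hlen⟩ := findFrom_facts hs h
      set j := PySem.Chars.findFrom s ("sent".toList) (start : Int) with hj
      have hstart' : j.toNat + 1 ≤ s.length := by omega
      simp only [h, ite_false]
      by_cases hd : pvIsDigitAt s (j + 4) = true
      · simp only [hd, ite_true, List.nil_append]
        rw [findAll_acc s _ f (j.toNat + 1) [j]]
        match count with
        | 0 =>
          simp only [Nat.lt_irrefl, ite_false]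
          rw [ih (j.toNat + 1) 1 j d hstart' (fun m _ h1 => hk m (by omega) h1)]
          simp [tailSpec]
        | k + 1 =>
          simp only [Nat.zero_lt_succ, ite_true]
          rw [ih (j.toNat + 1) (k + 2) j _ hstart' ?fresh]
          case fresh =>
            intro m hm h1
            rw [PySem.Dict.contains_insert]
            rw [pvKey_beq_false (by omega)]
            simp only [Bool.false_or]
            exact hk m (by omega) h1
          rw [PySem.Dict.items_insert_of_not_contains _ _ (hk (k + 1) le_rfl (by omega))]
          simp [tailSpec, pairsCont]
      · simp only [Bool.not_eq_true] at hd
        simp only [hd, Bool.false_eq_true, ite_false]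
        exact ih (j.toNat + 1) count prev d hstart' hk

-- A's dictionary-building loop over range(len(Q)), started at position a, appends the pairs
-- derived from the index list Q from position a on
lemma fold_eq (s : List Char) (Q : List Int) : ∀ (k a : Nat) (d : PySem.Dict String String),
    a + k = Q.length →
    (∀ m : Nat, a + 1 ≤ m → d.contains (pvKey (m : Int)) = false) →
    ((PySem.List.pyRange (a : Int) (Q.length : Int)).foldl
      (fun (d : PySem.Dict String String) index_s =>
        if index_s ≠ (Q.length : Int) - 1 then
          d.insert (pvKey (index_s + 1))
            (String.ofList (PySem.List.slice s (some (PySem.List.pyGetD Q index_s 0))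
              (some (PySem.List.pyGetD Q (index_s + 1) 0 - 1))))
        else
          d.insert (pvKey (index_s + 1))
            (String.ofList (PySem.List.slice s (some (PySem.List.pyGetD Q index_s 0)) none))) d).items
      = d.items ++ (match Q.drop a with
        | [] => []
        | j :: rest => pairsCont s (a + 1) j rest) := by
  intro k
  induction k with
  | zero =>
    intro a d ha hk
    rw [PySem.List.pyRange_one_eq_nil (by omega)]
    rw [List.drop_eq_nil_of_le (by omega)]
    simp
  | succ k ih =>
    intro a d ha hk
    have halt : a < Q.length := by omega
    rw [PySem.List.pyRange_one_cons (by exact_mod_cast halt)]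
    simp only [List.foldl_cons]
    have hget : PySem.List.pyGetD Q (a : Int) 0 = Q[a] := by
      rw [PySem.List.pyGetD_of_nonneg Q 0 (by positivity)]
      simp [halt]
    have hdrop : Q.drop a = Q[a] :: Q.drop (a + 1) := List.drop_eq_getElem_cons halt
    match k with
    | 0 =>
      have hla : (a : Int) = (Q.length : Int) - 1 := by omega
      rw [if_neg (by omega)]
      rw [show ((a : Int) + 1) = ((a + 1 : Nat) : Int) by push_cast; ring]
      rw [PySem.List.pyRange_one_eq_nil (by omega)]
      simp only [List.foldl_nil]
      rw [PySem.Dict.items_insert_of_not_contains _ _ (hk (a + 1) le_rfl)]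
      rw [hdrop, List.drop_eq_nil_of_le (by omega)]
      simp [pairsCont, hget]
    | k' + 1 =>
      rw [if_pos (by omega)]
      rw [show ((a : Int) + 1) = ((a + 1 : Nat) : Int) by push_cast; ring]
      have hget' : PySem.List.pyGetD Q ((a + 1 : Nat) : Int) 0 = Q[a + 1] := by
        rw [PySem.List.pyGetD_of_nonneg Q 0 (by positivity)]
        simp [show a + 1 < Q.length by omega]
      rw [ih (a + 1) _ (by omega) ?fresh]
      case fresh =>
        intro m hm
        rw [PySem.Dict.contains_insert]
        rw [pvKey_beq_false (by omega)]
        simp only [Bool.false_or]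
        exact hk m (by omega)
      rw [PySem.Dict.items_insert_of_not_contains _ _ (hk (a + 1) le_rfl)]
      rw [hdrop, List.drop_eq_getElem_cons (show a + 1 < Q.length by omega)]
      simp only [pairsCont, hget, hget']
      simp

-- ===== VERDICT (by name: the statement is the Claim_ definition above) =====
theorem make_context_dict_spec : Claim_equal_make_context_dict := by
  intro context _ _
  show make_context_dict context = make_context_dict_alt context
  unfold make_context_dict make_context_dict_alt
  dsimp only
  rw [stream_eq context.toList (context.toList.length + 1) 0 0 0 PySem.Dict.empty (by omega)
      (fun m _ _ => PySem.Dict.contains_empty _)]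
  have hf := fold_eq context.toList
    (findAllSubstr context.toList ("sent".toList) 0 [] (context.toList.length + 1))
    (findAllSubstr context.toList ("sent".toList) 0 [] (context.toList.length + 1)).length 0
    PySem.Dict.empty (by omega) (fun m _ => PySem.Dict.contains_empty _)
  rw [Nat.cast_zero] at hf
  rw [hf]
  simp only [List.drop_zero]
  cases findAllSubstr context.toList ("sent".toList) 0 [] (context.toList.length + 1) with
  | nil => simp [tailSpec]
  | cons j rest => simp [tailSpec]
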